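-- pv_equiv track=rewrite | github.com/quihuang/Agenda-virtual-de-citas | utilidades.py | validateBloodType
-- ===== SOURCE A (Python) =====
-- def validateBloodType (bloodType: str) -> bool:
--
--     """
--     Función encargada de validar el tipo de sangre del usuario.
--
--     Parameters
--     ------------------
--     bloodType : str
--         Grupo sanguineo del usuario.
--
--     Returns
--     ------------------
--     valBloodType : bool
--         Retorna un True en el caso de ser valido, de lo contrario devuelve un False
--     """
--
--     letter = ["O","A","B"]
--     sign = ["+","-"]
--
--     valBloodType = False
--     if(len(bloodType) == 2):
--         for l in letter :
--             if(bloodType[0].upper() == l):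
--                 for s in sign :
--                     if(bloodType[1].upper() == s):
--                          valBloodType = True
--
--     return valBloodType
-- ===== SOURCE B (Python) =====
-- VALID_BLOOD_TYPES = frozenset({"O+", "O-", "A+", "A-", "B+", "B-"})
--
--
-- def validateBloodType(bloodType: str) -> bool:
--     """Whole-string table lookup: normalize case once, then one membership test."""
--     return bloodType.upper() in VALID_BLOOD_TYPES
-- ===== Notes on version B (the rewrite author's own statement) =====
-- stated objective: simpler
-- what changed: Replaced the explicit length guard and the two nested positional loops over letter/sign lists by a single whole-string membership test of the uppercased input in a precomputed frozenset of the six valid blood types.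
import Mathlib
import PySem

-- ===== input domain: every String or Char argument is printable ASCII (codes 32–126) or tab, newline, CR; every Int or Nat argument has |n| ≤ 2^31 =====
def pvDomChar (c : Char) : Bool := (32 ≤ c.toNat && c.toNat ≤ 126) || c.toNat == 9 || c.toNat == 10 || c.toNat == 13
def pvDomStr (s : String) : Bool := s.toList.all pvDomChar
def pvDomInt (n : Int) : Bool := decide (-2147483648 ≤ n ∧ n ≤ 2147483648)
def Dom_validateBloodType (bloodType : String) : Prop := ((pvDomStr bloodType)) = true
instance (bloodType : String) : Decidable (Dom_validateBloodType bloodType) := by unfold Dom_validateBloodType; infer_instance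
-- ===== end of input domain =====

-- B replaces A's length guard and nested positional letter/sign loops by one membership test
-- of the uppercased whole string in a precomputed table of the six valid blood types (simpler).


-- ===== PORT A =====
-- Python 1-char strings bloodType[0]/[1] and the letter/sign entries are ported as Chars;
-- .upper() on the extracted char is PySem.Chars.upperChar (exact on the ASCII domain).
def validateBloodType (bloodType : String) : Bool :=
  let letter : List Char := ['O', 'A', 'B']
  let sign : List Char := ['+', '-']
  let valBloodType := false
  if PySem.Str.len bloodType = 2 then
    letter.foldl (fun valBloodType l =>
      if (PySem.Str.pyGet? bloodType 0).map PySem.Chars.upperChar = some l then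
        sign.foldl (fun valBloodType s =>
          if (PySem.Str.pyGet? bloodType 1).map PySem.Chars.upperChar = some s then true
          else valBloodType) valBloodType
      else valBloodType) valBloodType
  else valBloodType

-- ===== PORT B =====
def validBloodTypes : List String := ["O+", "O-", "A+", "A-", "B+", "B-"]

def validateBloodType_alt (bloodType : String) : Bool :=
  validBloodTypes.contains (PySem.Str.upper bloodType)

-- ===== PRECONDITION & SPEC =====
def Spec_validateBloodType (bloodType : String) (out : Bool) : Prop := out = validateBloodType_alt bloodType
instance (bloodType : String) (out : Bool) : Decidable (Spec_validateBloodType bloodType out) := by unfold Spec_validateBloodType; infer_instance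

-- ===== CLAIM (what is proved, stated in full; the proofs are below) =====
def Claim_equal_validateBloodType : Prop := ∀ (bloodType : String), Dom_validateBloodType bloodType → Spec_validateBloodType bloodType (validateBloodType bloodType)

-- ===== LEMMAS AND PROOFS =====

theorem beq_eq_beq_toList (s t : String) : (s == t) = (s.toList == t.toList) := by
  rcases h : (s.toList == t.toList) with _ | _ <;> simp_all [String.ext_iff]

theorem alt_eq_toList (s : String) :
    validateBloodType_alt s =
      (s.toList.map PySem.Chars.upperChar == ['O', '+'] ||
       s.toList.map PySem.Chars.upperChar == ['O', '-'] ||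
       s.toList.map PySem.Chars.upperChar == ['A', '+'] ||
       s.toList.map PySem.Chars.upperChar == ['A', '-'] ||
       s.toList.map PySem.Chars.upperChar == ['B', '+'] ||
       s.toList.map PySem.Chars.upperChar == ['B', '-']) := by
  have h1 : "O+".toList = ['O', '+'] := by decide
  have h2 : "O-".toList = ['O', '-'] := by decide
  have h3 : "A+".toList = ['A', '+'] := by decide
  have h4 : "A-".toList = ['A', '-'] := by decide
  have h5 : "B+".toList = ['B', '+'] := by decide
  have h6 : "B-".toList = ['B', '-'] := by decide
  simp only [validateBloodType_alt, validBloodTypes, List.contains_cons,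
    List.contains_nil, beq_eq_beq_toList, PySem.Str.toList_upper, PySem.Chars.upper,
    h1, h2, h3, h4, h5, h6, Bool.or_false]
  ac_rfl

theorem len_eq_toList (s : String) : PySem.Str.len s = s.toList.length := by
  simp [PySem.Str.len]

theorem pyGet?_str (s : String) (i : Int) :
    PySem.Str.pyGet? s i = PySem.List.pyGet? s.toList i := by
  simp [PySem.Str.pyGet?]

-- ===== VERDICT (by name: the statement is the Claim_ definition above) =====
theorem pyGet2_zero (a b : Char) : PySem.List.pyGet? [a, b] 0 = some a := by
  simp [PySem.List.pyGet?, PySem.List.pyIdx?]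

theorem pyGet2_one (a b : Char) : PySem.List.pyGet? [a, b] 1 = some b := by
  simp [PySem.List.pyGet?, PySem.List.pyIdx?]

theorem beq3 (a b c : Char) (l : List Char) (x y : Char) : ((a :: b :: c :: l) == [x, y]) = false := by
  simp

theorem validateBloodType_spec : Claim_equal_validateBloodType := by
  intro s _
  unfold Spec_validateBloodType
  rw [alt_eq_toList]
  rcases h : s.toList with _ | ⟨c1, _ | ⟨c2, _ | ⟨c3, t⟩⟩⟩
  · simp [validateBloodType, h]
  · simp [validateBloodType, h]
  · simp only [validateBloodType, len_eq_toList, pyGet?_str, h, List.length_cons,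
      List.length_nil, List.map_cons, List.map_nil, List.foldl_cons, List.foldl_nil,
      Nat.cast_ofNat, Nat.zero_add, zero_add, Nat.cast_add, Nat.cast_one, Nat.cast_zero,
      pyGet2_zero, pyGet2_one, Option.map_some, Option.some.injEq]
    rw [if_pos (by norm_num)]
    by_cases h1 : PySem.Chars.upperChar c1 = 'O' <;>
      by_cases h2 : PySem.Chars.upperChar c1 = 'A' <;>
        by_cases h3 : PySem.Chars.upperChar c1 = 'B' <;>
          by_cases hp : PySem.Chars.upperChar c2 = '+' <;>
            by_cases hm : PySem.Chars.upperChar c2 = '-' <;>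
              simp [h1, h2, h3, hp, hm]
  · simp only [validateBloodType, len_eq_toList, h, List.length_cons, List.map_cons]
    rw [if_neg (by omega)]
    simp only [beq3, Bool.or_self]
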